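-- pv_equiv track=rewrite | github.com/wdeng123/CS4341-referee | lasker_morris_ai.py | _get_mills_containing
-- ===== SOURCE A (Python) =====
-- from typing import Dict, List, Optional, Tuple, Set
--
-- def _get_mills_containing(position: str) -> List[List[str]]:
--     """Get all possible mills containing the given position."""
--     mills = [
--         ['a1', 'a4', 'a7'], ['b2', 'b4', 'b6'], ['c3', 'c4', 'c5'],
--         ['d1', 'd2', 'd3'], ['d5', 'd6', 'd7'], ['e3', 'e4', 'e5'],
--         ['f2', 'f4', 'f6'], ['g1', 'g4', 'g7'],
--         ['a1', 'd1', 'g1'], ['b2', 'd2', 'f2'], ['c3', 'd3', 'e3'],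
--         ['a4', 'b4', 'c4'], ['e4', 'f4', 'g4'], ['c5', 'd5', 'e5'],
--         ['b6', 'd6', 'f6'], ['a7', 'd7', 'g7']
--     ]
--     return [mill for mill in mills if position in mill]
-- ===== SOURCE B (Python) =====
-- def _get_mills_containing(position: str):
--     """Get all possible mills containing the given position (computed from board geometry, no scan over a mills table)."""
--     ranks_for = {'a': '147', 'b': '246', 'c': '345', 'e': '345', 'f': '246', 'g': '147'}
--     files_for = {'1': 'adg', '2': 'bdf', '3': 'cde', '5': 'cde', '6': 'bdf', '7': 'adg'}
--     if len(position) != 2: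
--         return []
--     f, r = position[0], position[1]
--     if f == 'd':
--         ranks = '123' if r in '123' else ('567' if r in '567' else None)
--     else:
--         ranks = ranks_for.get(f)
--     if r == '4':
--         files = 'abc' if f in 'abc' else ('efg' if f in 'efg' else None)
--     else:
--         files = files_for.get(r)
--     result = []
--     if ranks is not None and r in ranks:
--         result.append([f + x for x in ranks])
--     if files is not None and f in files:
--         result.append([x + r for x in files])
--     return result
-- ===== Notes on version B (the rewrite author's own statement) =====
-- stated objective: alternative
-- what changed: B computes the at-most-two mills containing a position directly from board geometry (file->ranks and rank->files line tables plus the split d-file/4-rank lines) instead of filtering a hardcoded list of all 16 mills.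
import Mathlib
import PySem

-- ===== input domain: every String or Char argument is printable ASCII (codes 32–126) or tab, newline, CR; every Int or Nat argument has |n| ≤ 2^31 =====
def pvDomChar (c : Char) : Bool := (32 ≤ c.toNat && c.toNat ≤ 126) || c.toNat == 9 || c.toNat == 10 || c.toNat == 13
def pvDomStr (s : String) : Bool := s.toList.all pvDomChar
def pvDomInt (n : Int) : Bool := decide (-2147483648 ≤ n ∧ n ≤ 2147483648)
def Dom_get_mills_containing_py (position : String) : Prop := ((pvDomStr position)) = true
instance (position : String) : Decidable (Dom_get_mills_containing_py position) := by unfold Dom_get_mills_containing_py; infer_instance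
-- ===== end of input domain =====

-- B derives the (at most two) mills containing a position from the board geometry
-- (file→ranks and rank→files line tables) instead of filtering a 16-mill list (alternative, same cost).

-- ===== PORT A =====
def pvMills : List (List String) :=
  [["a1", "a4", "a7"], ["b2", "b4", "b6"], ["c3", "c4", "c5"],
   ["d1", "d2", "d3"], ["d5", "d6", "d7"], ["e3", "e4", "e5"],
   ["f2", "f4", "f6"], ["g1", "g4", "g7"],
   ["a1", "d1", "g1"], ["b2", "d2", "f2"], ["c3", "d3", "e3"],
   ["a4", "b4", "c4"], ["e4", "f4", "g4"], ["c5", "d5", "e5"],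
   ["b6", "d6", "f6"], ["a7", "d7", "g7"]]

def get_mills_containing_py (position : String) : List (List String) :=
  pvMills.filter (fun mill => mill.contains position)

-- ===== PORT B =====
-- ranks_for = {'a': '147', …} (a Python str of single chars ≡ List Char)
def pvRanksFor : PySem.Dict Char (List Char) :=
  PySem.Dict.ofList
    [('a', ['1','4','7']), ('b', ['2','4','6']), ('c', ['3','4','5']),
     ('e', ['3','4','5']), ('f', ['2','4','6']), ('g', ['1','4','7'])]

-- files_for = {'1': 'adg', …}
def pvFilesFor : PySem.Dict Char (List Char) :=
  PySem.Dict.ofList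
    [('1', ['a','d','g']), ('2', ['b','d','f']), ('3', ['c','d','e']),
     ('5', ['c','d','e']), ('6', ['b','d','f']), ('7', ['a','d','g'])]

-- body of B after the `len(position) != 2` guard, on position's characters;
-- `r in '123'` on a single char r is exactly list membership of chars
def pvAltCore (ls : List Char) : List (List String) :=
  match ls with
  | [f, r] =>
    let ranks : Option (List Char) :=
      if f = 'd' then
        if (['1','2','3'] : List Char).contains r then some ['1','2','3']
        else if (['5','6','7'] : List Char).contains r then some ['5','6','7']
        else none
      else pvRanksFor.get? f
    let files : Option (List Char) :=
      if r = '4' then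
        if (['a','b','c'] : List Char).contains f then some ['a','b','c']
        else if (['e','f','g'] : List Char).contains f then some ['e','f','g']
        else none
      else pvFilesFor.get? r
    let res1 : List (List String) :=
      match ranks with
      | some rs => if rs.contains r then [rs.map (fun x => String.ofList [f, x])] else []
      | none => []
    let res2 : List (List String) :=
      match files with
      | some fs => if fs.contains f then [fs.map (fun x => String.ofList [x, r])] else []
      | none => []
    res1 ++ res2
  | _ => []

def get_mills_containing_py_alt (position : String) : List (List String) :=
  pvAltCore position.toList

-- ===== PRECONDITION & SPEC =====
def Spec_get_mills_containing_py (position : String) (out : List (List String)) : Prop := out = get_mills_containing_py_alt position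
instance (position : String) (out : List (List String)) : Decidable (Spec_get_mills_containing_py position out) := by unfold Spec_get_mills_containing_py; infer_instance

-- ===== CLAIM (what is proved, stated in full; the proofs are below) =====
def Claim_equal_get_mills_containing_py : Prop := ∀ (position : String), Dom_get_mills_containing_py position → Spec_get_mills_containing_py position (get_mills_containing_py position)

-- ===== LEMMAS AND PROOFS =====
def pvLetters : List Char := ['a','b','c','d','e','f','g']
def pvDigits : List Char := ['1','2','3','4','5','6','7']

def pvPositions : List String :=
  ["a1", "a4", "a7", "b2", "b4", "b6", "c3", "c4", "c5",
   "d1", "d2", "d3", "d5", "d6", "d7", "e3", "e4", "e5",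
   "f2", "f4", "f6", "g1", "g4", "g7"]

lemma pv_ne (ls : List Char) (s : String) (h : ls ≠ s.toList) : String.ofList ls ≠ s := by
  intro he
  apply h
  rw [← he]
  simp

-- A's filter is empty whenever position's char list differs from every board position's
lemma pv_filter_nil (ls : List Char) (h : ∀ s ∈ pvPositions, ls ≠ s.toList) :
    pvMills.filter (fun mill => mill.contains (String.ofList ls)) = [] := by
  rw [List.filter_eq_nil_iff]
  intro mill hm
  simp only [List.contains_eq_mem, decide_eq_true_eq]
  intro hmem
  fin_cases hm <;> simp only [List.mem_cons, List.not_mem_nil, or_false] at hmem <;>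
    rcases hmem with h' | h' | h' <;>
    exact pv_ne ls _ (h _ (by decide)) h'

lemma pvRanksFor_eq : pvRanksFor = PySem.Dict.mk
    [('a', ['1','4','7']), ('b', ['2','4','6']), ('c', ['3','4','5']),
     ('e', ['3','4','5']), ('f', ['2','4','6']), ('g', ['1','4','7'])] := by decide

lemma pvFilesFor_eq : pvFilesFor = PySem.Dict.mk
    [('1', ['a','d','g']), ('2', ['b','d','f']), ('3', ['c','d','e']),
     ('5', ['c','d','e']), ('6', ['b','d','f']), ('7', ['a','d','g'])] := by decide

lemma pv_altcore_nil_left (f r : Char) (hf : f ∉ pvLetters) : pvAltCore [f, r] = [] := by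
  simp only [pvLetters, List.mem_cons, List.not_mem_nil, or_false, not_or] at hf
  obtain ⟨ha, hb, hc, hd, he, hf6, hg⟩ := hf
  have hget : pvRanksFor.get? f = none := by
    rw [pvRanksFor_eq]
    simp [PySem.Dict.get?, Ne.symm ha, Ne.symm hb, Ne.symm hc, Ne.symm he, Ne.symm hf6, Ne.symm hg]
  simp only [pvAltCore, if_neg hd, hget]
  by_cases h4 : r = '4'
  · simp [h4, List.contains_eq_mem, ha, hb, hc, he, hf6, hg]
  · rcases hq2 : pvFilesFor.get? r with _ | fs
    · simp [if_neg h4]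
    · have hfs : fs ∈ [(['a','d','g'] : List Char), ['b','d','f'], ['c','d','e']] := by
        rw [pvFilesFor_eq] at hq2
        simp [PySem.Dict.get?] at hq2
        obtain ⟨a, hq2⟩ := hq2
        rcases hq2 with ⟨-,-,rfl⟩|⟨-,⟨-,-,rfl⟩|⟨-,⟨-,-,rfl⟩|⟨-,⟨-,-,rfl⟩|⟨-,⟨-,-,rfl⟩|⟨-,-,-,rfl⟩⟩⟩⟩⟩ <;> simp
      simp only [if_neg h4]
      fin_cases hfs <;> simp [List.contains_eq_mem, ha, hb, hc, hd, he, hf6, hg]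

lemma pv_altcore_nil_right (f r : Char) (hr : r ∉ pvDigits) : pvAltCore [f, r] = [] := by
  simp only [pvDigits, List.mem_cons, List.not_mem_nil, or_false, not_or] at hr
  obtain ⟨h1, h2, h3, h4, h5, h6, h7⟩ := hr
  have hff : pvFilesFor.get? r = none := by
    rw [pvFilesFor_eq]
    simp [PySem.Dict.get?, Ne.symm h1, Ne.symm h2, Ne.symm h3, Ne.symm h5, Ne.symm h6, Ne.symm h7]
  by_cases hd : f = 'd'
  · simp [pvAltCore, hd, hff, List.contains_eq_mem, h1, h2, h3, h5, h6, h7]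
  · rcases hq : pvRanksFor.get? f with _ | rs
    · simp [pvAltCore, if_neg hd, hq, if_neg h4, hff]
    · have hrs : rs ∈ [(['1','4','7'] : List Char), ['2','4','6'], ['3','4','5']] := by
        rw [pvRanksFor_eq] at hq
        simp [PySem.Dict.get?] at hq
        obtain ⟨a, hq⟩ := hq
        rcases hq with ⟨-,-,rfl⟩|⟨-,⟨-,-,rfl⟩|⟨-,⟨-,-,rfl⟩|⟨-,⟨-,-,rfl⟩|⟨-,⟨-,-,rfl⟩|⟨-,-,-,rfl⟩⟩⟩⟩⟩ <;> simp
      simp only [pvAltCore, if_neg hd, hq, if_neg h4, hff]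
      fin_cases hrs <;> simp [List.contains_eq_mem, h1, h2, h3, h4, h5, h6, h7]

lemma pv_core (ls : List Char) :
    pvMills.filter (fun mill => mill.contains (String.ofList ls)) = pvAltCore ls := by
  match ls with
  | [] =>
    rw [pv_filter_nil]
    · rfl
    · intro s hs; fin_cases hs <;> simp
  | [f] =>
    rw [pv_filter_nil]
    · rfl
    · intro s hs; fin_cases hs <;> simp
  | f :: r :: c :: t =>
    rw [pv_filter_nil]
    · rfl
    · intro s hs; fin_cases hs <;> simp
  | [f, r] =>
    by_cases hf : f ∈ pvLetters
    · by_cases hr : r ∈ pvDigits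
      · fin_cases hf <;> fin_cases hr <;> decide
      · rw [pv_altcore_nil_right f r hr, pv_filter_nil]
        simp only [pvDigits, List.mem_cons, List.not_mem_nil, or_false, not_or] at hr
        intro s hs; fin_cases hs <;> simp_all
    · rw [pv_altcore_nil_left f r hf, pv_filter_nil]
      simp only [pvLetters, List.mem_cons, List.not_mem_nil, or_false, not_or] at hf
      intro s hs; fin_cases hs <;> simp_all

-- ===== VERDICT (by name: the statement is the Claim_ definition above) =====
theorem get_mills_containing_py_spec : Claim_equal_get_mills_containing_py := by
  intro position _
  show get_mills_containing_py position = get_mills_containing_py_alt position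
  have h := pv_core position.toList
  rwa [String.ofList_toList] at h
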